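-- pv_equiv track=rewrite | github.com/emendir/IPFS-Toolkit-Python | IPFS_API_Remote_Client.py | FromB255No0s
-- ===== SOURCE A (Python) =====
-- def FromB255No0s(array):
--     number = 0
--     order = 1
--     # for loop backwards through th ebytes in array
--     i = len(array) - 1  # th eindex of the last byte in the array
--     while(i >= 0):
--         # byte - 1 to change the range from 1-266 to 0-255
--         number = number + (array[i] - 1) * order
--         order = order * 255
--         i = i - 1
--     return number
-- ===== SOURCE B (Python) =====
-- def FromB255No0s(array):
--     number = 0
--     for b in array:
--         number = number * 255 + (b - 1)
--     return number
-- ===== Notes on version B (the rewrite author's own statement) =====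
-- stated objective: simpler
-- what changed: Replaces the backward index loop with an explicit 255^k order accumulator by a forward Horner fold (number = number*255 + (b-1)), dropping the power variable and the index arithmetic.
import Mathlib
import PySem

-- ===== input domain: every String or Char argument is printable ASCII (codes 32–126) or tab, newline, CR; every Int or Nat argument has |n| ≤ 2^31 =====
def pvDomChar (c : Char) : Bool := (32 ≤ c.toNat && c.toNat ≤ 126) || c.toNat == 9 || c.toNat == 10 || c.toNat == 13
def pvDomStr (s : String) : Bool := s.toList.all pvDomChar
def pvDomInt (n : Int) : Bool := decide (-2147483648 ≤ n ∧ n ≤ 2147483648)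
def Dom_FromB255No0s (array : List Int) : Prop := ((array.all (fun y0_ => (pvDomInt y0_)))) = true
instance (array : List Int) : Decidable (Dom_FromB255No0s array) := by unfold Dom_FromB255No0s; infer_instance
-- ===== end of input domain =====

-- B replaces A's backward index loop with a 255^k order accumulator by a forward Horner fold; objective: simpler.

-- ===== PORT A =====
-- A's while loop, counting i down from len-1 to 0; state (number, order).
-- Recursion parameter n = i + 1; array[i] is always in range, so getD 0 is never the default.
def FromB255No0s_goA (array : List Int) : Nat → Int → Int → Int
  | 0, number, _ => number
  | n + 1, number, order =>
      FromB255No0s_goA array n (number + (((PySem.List.pyGet? array (n : Int)).getD 0) - 1) * order) (order * 255)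

def FromB255No0s (array : List Int) : Int :=
  FromB255No0s_goA array array.length 0 1

-- ===== PORT B =====
def FromB255No0s_alt (array : List Int) : Int :=
  array.foldl (fun number b => number * 255 + (b - 1)) 0

-- ===== PRECONDITION & SPEC =====
def Spec_FromB255No0s (array : List Int) (out : Int) : Prop := out = FromB255No0s_alt array
instance (array : List Int) (out : Int) : Decidable (Spec_FromB255No0s array out) := by unfold Spec_FromB255No0s; infer_instance

-- ===== CLAIM (what is proved, stated in full; the proofs are below) =====
def Claim_equal_FromB255No0s : Prop := ∀ (array : List Int), Dom_FromB255No0s array → Spec_FromB255No0s array (FromB255No0s array)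

-- ===== LEMMAS AND PROOFS =====

-- A's loop from i = n-1 down to 0 computes number + order * Horner(first n elements).
theorem FromB255No0s_goA_eq (array : List Int) (n : Nat) (hn : n ≤ array.length)
    (number order : Int) :
    FromB255No0s_goA array n number order =
      number + order * ((array.take n).foldl (fun acc b => acc * 255 + (b - 1)) 0) := by
  induction n generalizing number order with
  | zero => simp [FromB255No0s_goA]
  | succ k ih =>
      have hk : k < array.length := by omega
      have hget : PySem.List.pyGet? array (k : Int) = some array[k] :=
        PySem.List.pyGet?_ofNat _ _ hk
      have htake : array.take (k + 1) = array.take k ++ [array[k]] := by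
        rw [List.take_add_one, List.getElem?_eq_getElem hk]; rfl
      rw [FromB255No0s_goA, ih (by omega), htake, List.foldl_append]
      simp [List.getElem?_eq_getElem hk]
      ring

theorem FromB255No0s_spec : Claim_equal_FromB255No0s := by
  intro array _
  unfold Spec_FromB255No0s FromB255No0s FromB255No0s_alt
  rw [FromB255No0s_goA_eq array array.length le_rfl]
  simp
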